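-- pv_equiv track=rewrite | github.com/matthew-lottly/geoprompt | src/geoprompt/classification.py | classify_values
-- ===== SOURCE A (Python) =====
-- from typing import Any, Sequence
--
-- def classify_values(
--     values: Sequence[float],
--     breaks: Sequence[float],
-- ) -> list[int]:
--     """Assign class labels to values based on break points."""
--     sb = sorted(breaks)
--     labels = []
--     for v in values:
--         cls = 0
--         for b in sb:
--             if v > b:
--                 cls += 1
--         labels.append(cls)
--     return labels
-- ===== SOURCE B (Python) =====
-- def classify_values(values, breaks):
--     """Assign class labels to values based on break points."""
--     sb = sorted(breaks)
--     order = sorted(range(len(values)), key=lambda i: values[i])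
--     labels = [0] * len(values)
--     j = 0
--     for i in order:
--         v = values[i]
--         while j < len(sb) and sb[j] < v:
--             j += 1
--         labels[i] = j
--     return labels
-- ===== Notes on version B (the rewrite author's own statement) =====
-- stated objective: faster
-- what changed: Instead of scanning all breaks for every value, B sorts the value indices by value and sweeps a single pointer over the sorted breaks once (two-pointer merge), writing each label into a preallocated output list.
import Mathlib
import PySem

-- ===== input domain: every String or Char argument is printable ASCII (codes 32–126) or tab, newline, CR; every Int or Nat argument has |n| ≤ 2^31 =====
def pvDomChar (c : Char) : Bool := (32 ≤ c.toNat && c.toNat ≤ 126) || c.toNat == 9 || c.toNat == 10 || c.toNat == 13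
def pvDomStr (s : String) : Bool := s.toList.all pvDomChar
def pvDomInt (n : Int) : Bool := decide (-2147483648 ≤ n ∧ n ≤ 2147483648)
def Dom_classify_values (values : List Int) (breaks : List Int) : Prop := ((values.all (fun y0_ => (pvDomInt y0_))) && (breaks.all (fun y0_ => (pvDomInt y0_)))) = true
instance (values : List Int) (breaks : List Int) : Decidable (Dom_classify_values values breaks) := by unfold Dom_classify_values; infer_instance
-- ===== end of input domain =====

-- B replaces A's per-value scan over all breaks with a two-pointer merge: values are visited
-- in sorted order while one pointer sweeps the sorted breaks once; labels go into a
-- preallocated output list.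

-- ===== PORT A =====
def classify_values (values : List Int) (breaks : List Int) : List Int :=
  let sb := PySem.List.sorted breaks (fun x => x) false
  values.foldl (fun labels v =>
    labels ++ [sb.foldl (fun cls b => if v > b then cls + 1 else cls) 0]) []

-- ===== PORT B =====
-- Source B's inner 'while j < len(sb) and sb[j] < v: j += 1' loop:
def pvAdvance (sb : List Int) (v : Int) (j : Nat) : Nat :=
  if h : j < sb.length then
    if sb[j] < v then pvAdvance sb v (j + 1) else j
  else j
termination_by sb.length - j

def classify_values_alt (values : List Int) (breaks : List Int) : List Int :=
  let sb := PySem.List.sorted breaks (fun x => x) false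
  let order := PySem.List.sorted (List.range values.length) (fun i => values.getD i 0) false
  (order.foldl (fun (st : List Int × Nat) i =>
      let v := values.getD i 0
      let j := pvAdvance sb v st.2
      (st.1.set i (j : Int), j))
    (List.replicate values.length 0, 0)).1

-- ===== PRECONDITION & SPEC =====
def Spec_classify_values (values : List Int) (breaks : List Int) (out : List Int) : Prop := out = classify_values_alt values breaks
instance (values : List Int) (breaks : List Int) (out : List Int) : Decidable (Spec_classify_values values breaks out) := by unfold Spec_classify_values; infer_instance

-- ===== CLAIM (what is proved, stated in full; the proofs are below) =====
def Claim_equal_classify_values : Prop := ∀ (values : List Int) (breaks : List Int), Dom_classify_values values breaks → Spec_classify_values values breaks (classify_values values breaks)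

-- ===== LEMMAS AND PROOFS =====

-- A's inner loop counts the breaks strictly below v.
lemma inner_foldl_countP (v : Int) : ∀ (l : List Int) (c : Int),
    l.foldl (fun cls b => if v > b then cls + 1 else cls) c = c + l.countP (fun b => decide (b < v)) := by
  intro l
  induction l with
  | nil => intro c; simp
  | cons a t ih =>
    intro c
    by_cases h : a < v
    · simp [h, ih, gt_iff_lt]; ring
    · simp [h, ih, gt_iff_lt]

-- On a sorted list, the elements below v are exactly the first countP positions.
lemma sorted_lt_iff (v : Int) : ∀ (l : List Int), l.Pairwise (fun a b => a ≤ b) →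
    ∀ j (hj : j < l.length), (l[j] < v ↔ j < l.countP (fun b => decide (b < v))) := by
  intro l
  induction l with
  | nil => intro _ j hj; simp at hj
  | cons a t ih =>
    intro hs j hj
    have hat : ∀ x ∈ t, a ≤ x := fun x hx => (List.pairwise_cons.mp hs).1 x hx
    have hst : t.Pairwise (fun a b => a ≤ b) := (List.pairwise_cons.mp hs).2
    by_cases ha : a < v
    · have hc : (a :: t).countP (fun b => decide (b < v)) = t.countP (fun b => decide (b < v)) + 1 := by
        simp [ha]
      cases j with
      | zero => simp [ha, hc]
      | succ j =>
        have hj' : j < t.length := by simpa using hj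
        have := ih hst j hj'
        simpa [hc] using this
    · have hc : (a :: t).countP (fun b => decide (b < v)) = 0 := by
        have ht0 : t.countP (fun b => decide (b < v)) = 0 := by
          rw [List.countP_eq_zero]
          intro x hx
          have := hat x hx
          simp only [decide_eq_true_eq]
          omega
        simp [ha, ht0]
      rw [hc]
      cases j with
      | zero => simpa using ha
      | succ j =>
        have hj' : j < t.length := by simpa using hj
        have hx := hat _ (List.getElem_mem hj')
        constructor
        · intro h; exfalso; simp at h ⊢; omega
        · omega

-- The while loop advances j to exactly the number of breaks below v (given j starts no higher).
lemma advance_eq (sb : List Int) (v : Int) (hs : sb.Pairwise (fun a b => a ≤ b)) :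
    ∀ j, j ≤ sb.countP (fun b => decide (b < v)) →
      pvAdvance sb v j = sb.countP (fun b => decide (b < v)) := by
  have hcl : sb.countP (fun b => decide (b < v)) ≤ sb.length := List.countP_le_length
  have key : ∀ k j, sb.length - j ≤ k → j ≤ sb.countP (fun b => decide (b < v)) →
      pvAdvance sb v j = sb.countP (fun b => decide (b < v)) := by
    intro k
    induction k with
    | zero =>
      intro j hk hj
      have hlen : ¬ j < sb.length := by omega
      rw [pvAdvance]
      simp only [hlen, dite_false]
      omega
    | succ k ih =>
      intro j hk hj
      rw [pvAdvance]
      by_cases hlen : j < sb.length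
      · simp only [hlen, dite_true]
        by_cases hlt : sb[j] < v
        · have hjc : j < sb.countP (fun b => decide (b < v)) :=
            (sorted_lt_iff v sb hs j hlen).mp hlt
          simp only [hlt, if_true]
          exact ih (j + 1) (by omega) (by omega)
        · have hjc : ¬ j < sb.countP (fun b => decide (b < v)) := fun h =>
            hlt ((sorted_lt_iff v sb hs j hlen).mpr h)
          simp only [hlt, if_false]
          omega
      · simp only [hlen, dite_false]
        omega
  exact fun j => key (sb.length - j) j le_rfl

-- Folding the merge step over indices with monotone values is the same as writing each index's count.
lemma fold_step_eq (sb : List Int) (values : List Int) (hs : sb.Pairwise (fun a b => a ≤ b)) :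
    ∀ (is : List Nat) (L : List Int) (j : Nat),
      (∀ i ∈ is, j ≤ sb.countP (fun b => decide (b < values.getD i 0))) →
      is.Pairwise (fun i i' => values.getD i 0 ≤ values.getD i' 0) →
      (is.foldl (fun (st : List Int × Nat) i =>
          (st.1.set i ((pvAdvance sb (values.getD i 0) st.2 : Nat) : Int),
           pvAdvance sb (values.getD i 0) st.2)) (L, j)).1
        = is.foldl (fun L i => L.set i ((sb.countP (fun b => decide (b < values.getD i 0)) : Nat) : Int)) L := by
  intro is
  induction is with
  | nil => intro L j _ _; rfl
  | cons i t ih =>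
    intro L j hle hp
    have hji : j ≤ sb.countP (fun b => decide (b < values.getD i 0)) := hle i (List.mem_cons_self)
    have hadv : pvAdvance sb (values.getD i 0) j = sb.countP (fun b => decide (b < values.getD i 0)) :=
      advance_eq sb _ hs j hji
    have hmono : ∀ i' ∈ t,
        sb.countP (fun b => decide (b < values.getD i 0)) ≤ sb.countP (fun b => decide (b < values.getD i' 0)) := by
      intro i' hi'
      apply List.countP_mono_left
      intro b _ hb
      have hv := (List.pairwise_cons.mp hp).1 i' hi'
      simp only [decide_eq_true_eq] at hb ⊢
      omega
    simp only [List.foldl_cons, hadv]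
    exact ih _ _ (fun i' hi' => hmono i' hi') (List.pairwise_cons.mp hp).2

-- Writing f i at each index of a duplicate-free index list, read back by position.
lemma foldl_set_getElem? (f : Nat → Int) :
    ∀ (is : List Nat) (L : List Int), is.Nodup → (∀ i ∈ is, i < L.length) →
      ∀ k, (is.foldl (fun L i => L.set i (f i)) L)[k]? = if k ∈ is then some (f k) else L[k]? := by
  intro is
  induction is with
  | nil => intro L _ _ k; simp
  | cons i t ih =>
    intro L hnd hb k
    have hnd' := (List.nodup_cons.mp hnd).2
    have hit : i ∉ t := (List.nodup_cons.mp hnd).1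
    have hiL : i < L.length := hb i (List.mem_cons_self)
    have hb' : ∀ i' ∈ t, i' < (L.set i (f i)).length := by
      intro i' hi'; simpa using hb i' (List.mem_cons_of_mem _ hi')
    rw [List.foldl_cons, ih (L.set i (f i)) hnd' hb' k]
    by_cases hkt : k ∈ t
    · simp [hkt, List.mem_cons]
    · by_cases hki : k = i
      · subst hki
        simp [hkt, hiL]
      · simp [hkt, hki, Ne.symm hki]

theorem classify_values_spec : Claim_equal_classify_values := by
  intro values breaks _
  unfold Spec_classify_values classify_values classify_values_alt
  simp only []
  have hs : (PySem.List.sorted breaks (fun x => x) false).Pairwise (fun a b => a ≤ b) :=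
    PySem.List.sorted_pairwise breaks (fun x => x)
  set sb := PySem.List.sorted breaks (fun x => x) false with hsb
  set n := values.length with hn
  set order := PySem.List.sorted (List.range n) (fun i => values.getD i 0) false with horder
  set c : Nat → Nat := fun i => sb.countP (fun b => decide (b < values.getD i 0)) with hc
  -- properties of the index order
  have hperm : order.Perm (List.range n) := PySem.List.sorted_perm _ _ _
  have hnd : order.Nodup := hperm.nodup_iff.mpr (List.nodup_range)
  have hmem : ∀ k, k ∈ order ↔ k < n := by
    intro k
    rw [hperm.mem_iff, List.mem_range]
  have hp : order.Pairwise (fun i i' => values.getD i 0 ≤ values.getD i' 0) :=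
    PySem.List.sorted_pairwise _ _
  -- the B fold writes c i at every index
  have hB : (order.foldl (fun (st : List Int × Nat) i =>
        (st.1.set i ((pvAdvance sb (values.getD i 0) st.2 : Nat) : Int),
         pvAdvance sb (values.getD i 0) st.2)) (List.replicate n 0, 0)).1
      = order.foldl (fun L i => L.set i ((c i : Nat) : Int)) (List.replicate n 0) :=
    fold_step_eq sb values hs order (List.replicate n 0) 0 (fun _ _ => Nat.zero_le _) hp
  -- A's fold is a map
  have hA : values.foldl (fun (labels : List Int) v =>
        labels ++ [sb.foldl (fun cls b => if v > b then cls + 1 else cls) (0 : Int)]) []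
      = values.map (fun v => sb.foldl (fun cls b => if v > b then cls + 1 else cls) (0 : Int)) := by
    simpa using PySem.List.foldl_append_singleton_eq_map
      (fun v => sb.foldl (fun cls b => if v > b then cls + 1 else cls) (0 : Int)) values []
  rw [hB]
  refine Eq.trans hA ?_
  apply List.ext_getElem?
  intro k
  have hbnd : ∀ i ∈ order, i < (List.replicate n (0 : Int)).length := by
    intro i hi; simpa using (hmem i).mp hi
  rw [foldl_set_getElem? (fun i => ((c i : Nat) : Int)) order (List.replicate n 0) hnd hbnd k]
  by_cases hk : k < n
  · have hkv : values[k]? = some values[k] := List.getElem?_eq_getElem hk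
    have hgd : values.getD k 0 = values[k] := List.getD_eq_getElem values 0 hk
    simp only [(hmem k).mpr hk, if_true, List.getElem?_map, hkv, Option.map_some]
    rw [inner_foldl_countP]
    simp [hc, List.getD, hkv]
  · have hkv : values[k]? = none := List.getElem?_eq_none (by omega)
    have : k ∉ order := fun h => hk ((hmem k).mp h)
    simp [this, hkv, hk]
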